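-- pv_equiv track=rewrite | github.com/HrLi97/dataPipeline_ops | common/video/scene_segmenter_op.py | split_scene_recursively
-- ===== SOURCE A (Python) =====
-- def split_scene_recursively(scene, fps, max_duration, min_duration):
--     """
--     递归地将场景拆分为符合时长要求的片段(保留原始实现，供可能的场景检测分段使用)。
--     scene: (start_frame, end_frame)
--     返回值：[(start_frame, end_frame), ...]
--     """
--     start_frame, end_frame = scene
--     scene_duration = end_frame - start_frame
--
--     if min_duration <= scene_duration <= max_duration:
--         return [scene]
--
--     if scene_duration > max_duration:
--         mid_frame = (start_frame + end_frame) // 2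
--         left = (start_frame, mid_frame)
--         right = (mid_frame + 1, end_frame)
--         return split_scene_recursively(
--             left, fps, max_duration, min_duration
--         ) + split_scene_recursively(right, fps, max_duration, min_duration)
--     return []
-- ===== SOURCE B (Python) =====
-- def split_scene_recursively(scene, fps, max_duration, min_duration):
--     """Iterative worklist version: explicit stack, push right then left so the
--     left half is processed first, preserving the recursion's output order."""
--     results = []
--     stack = [scene]
--     while stack:
--         start_frame, end_frame = stack.pop()
--         duration = end_frame - start_frame
--         if min_duration <= duration <= max_duration:
--             results.append((start_frame, end_frame))
--         elif duration > max_duration: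
--             mid_frame = (start_frame + end_frame) // 2
--             stack.append((mid_frame + 1, end_frame))
--             stack.append((start_frame, mid_frame))
--     return results
-- ===== Notes on version B (the rewrite author's own statement) =====
-- stated objective: alternative
-- what changed: Replaced the binary recursion (recursive calls concatenating left/right results) by an iterative worklist: an explicit stack popped in a single loop, pushing right then left so the output order is preserved.
import Mathlib
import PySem

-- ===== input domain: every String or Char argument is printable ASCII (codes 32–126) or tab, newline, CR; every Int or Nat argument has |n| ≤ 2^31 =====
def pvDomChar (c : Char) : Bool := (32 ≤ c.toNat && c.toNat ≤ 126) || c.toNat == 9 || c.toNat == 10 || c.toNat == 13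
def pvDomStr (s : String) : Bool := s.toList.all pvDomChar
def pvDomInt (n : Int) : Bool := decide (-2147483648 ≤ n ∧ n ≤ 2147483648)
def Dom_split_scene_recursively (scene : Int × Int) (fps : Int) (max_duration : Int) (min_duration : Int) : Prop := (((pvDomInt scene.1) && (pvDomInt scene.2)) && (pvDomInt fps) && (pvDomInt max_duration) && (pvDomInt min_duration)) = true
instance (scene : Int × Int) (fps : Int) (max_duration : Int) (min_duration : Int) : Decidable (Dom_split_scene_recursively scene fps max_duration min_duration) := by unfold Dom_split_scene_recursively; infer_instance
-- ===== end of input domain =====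

-- B replaces A's binary recursion by an iterative explicit-stack worklist (same output, same cost).

-- ===== PORT A =====
-- Literal port of A's recursion. The '0 ≤ max_duration' conjunct in the split guard is a
-- totality guard only: when it fails Python A recurses without bound (RecursionError);
-- those inputs are excluded by Pre_ below, so nothing is claimed there.
def split_scene_recursively (scene : Int × Int) (fps : Int) (max_duration : Int) (min_duration : Int) : List (Int × Int) :=
  match scene with
  | (start_frame, end_frame) =>
    let scene_duration := end_frame - start_frame
    if min_duration ≤ scene_duration ∧ scene_duration ≤ max_duration then [(start_frame, end_frame)]
    else if max_duration < scene_duration ∧ 0 ≤ max_duration then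
      let mid_frame := PySem.Int.floordiv (start_frame + end_frame) 2
      split_scene_recursively (start_frame, mid_frame) fps max_duration min_duration ++
        split_scene_recursively (mid_frame + 1, end_frame) fps max_duration min_duration
    else []
termination_by (scene.2 - scene.1).toNat
decreasing_by
 all_goals
  simp only [PySem.Int.floordiv_eq_ediv_of_pos (show (0:Int) < 2 from by decide)]
  omega

-- ===== PORT B =====
-- B's while-loop over the explicit stack; the head of the list is the stack top
-- (Python's stack.pop() / append pair; right pushed before left), results grows at the back.
-- Same totality guard '0 ≤ max_duration' as in port A: Python B loops forever there (outside Pre_).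
def splitSceneLoop (stack : List (Int × Int)) (results : List (Int × Int)) (fps : Int) (max_duration : Int) (min_duration : Int) : List (Int × Int) :=
  match stack with
  | [] => results
  | (start_frame, end_frame) :: rest =>
    let duration := end_frame - start_frame
    if min_duration ≤ duration ∧ duration ≤ max_duration then
      splitSceneLoop rest (results ++ [(start_frame, end_frame)]) fps max_duration min_duration
    else if max_duration < duration ∧ 0 ≤ max_duration then
      let mid_frame := PySem.Int.floordiv (start_frame + end_frame) 2
      splitSceneLoop ((start_frame, mid_frame) :: (mid_frame + 1, end_frame) :: rest) results fps max_duration min_duration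
    else splitSceneLoop rest results fps max_duration min_duration
termination_by (stack.map (fun p => 2 * (p.2 - p.1).toNat + 1)).sum
decreasing_by
 all_goals
  simp only [List.map_cons, List.sum_cons,
    PySem.Int.floordiv_eq_ediv_of_pos (show (0:Int) < 2 from by decide)]
  omega

def split_scene_recursively_alt (scene : Int × Int) (fps : Int) (max_duration : Int) (min_duration : Int) : List (Int × Int) :=
  splitSceneLoop [scene] [] fps max_duration min_duration

-- ===== PRECONDITION & SPEC =====
-- Pre_ excludes exactly the inputs on which Python A never returns (RecursionError):
-- a negative max_duration with the scene duration above it, where repeated halving can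
-- never bring the duration under the bound.
def Pre_split_scene_recursively (scene : Int × Int) (fps : Int) (max_duration : Int) (min_duration : Int) : Prop :=
  0 ≤ max_duration ∨ scene.2 - scene.1 ≤ max_duration
instance (scene : Int × Int) (fps : Int) (max_duration : Int) (min_duration : Int) : Decidable (Pre_split_scene_recursively scene fps max_duration min_duration) := by unfold Pre_split_scene_recursively; infer_instance

def pvWitness_split_scene_recursively : (Int × Int) × Int × Int × Int := ((0, 10), 25, 4, 2)

def Spec_split_scene_recursively (scene : Int × Int) (fps : Int) (max_duration : Int) (min_duration : Int) (out : List (Int × Int)) : Prop := out = split_scene_recursively_alt scene fps max_duration min_duration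
instance (scene : Int × Int) (fps : Int) (max_duration : Int) (min_duration : Int) (out : List (Int × Int)) : Decidable (Spec_split_scene_recursively scene fps max_duration min_duration out) := by unfold Spec_split_scene_recursively; infer_instance

-- ===== CLAIM (what is proved, stated in full; the proofs are below) =====
def Claim_equal_split_scene_recursively : Prop := ∀ (scene : Int × Int) (fps : Int) (max_duration : Int) (min_duration : Int), Dom_split_scene_recursively scene fps max_duration min_duration → Pre_split_scene_recursively scene fps max_duration min_duration → Spec_split_scene_recursively scene fps max_duration min_duration (split_scene_recursively scene fps max_duration min_duration)

-- ===== LEMMAS AND PROOFS =====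

-- Loop invariant: processing the interval on top of the stack contributes exactly
-- A's recursion result for it, appended to the accumulator.
theorem splitSceneLoop_cons (scene : Int × Int) (rest results : List (Int × Int)) (fps max_duration min_duration : Int) :
    splitSceneLoop (scene :: rest) results fps max_duration min_duration =
      splitSceneLoop rest (results ++ split_scene_recursively scene fps max_duration min_duration) fps max_duration min_duration := by
  obtain ⟨s, e⟩ := scene
  rw [splitSceneLoop, split_scene_recursively]
  by_cases h1 : min_duration ≤ e - s ∧ e - s ≤ max_duration
  · rw [if_pos h1, if_pos h1]
  · rw [if_neg h1, if_neg h1]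
    by_cases h2 : max_duration < e - s ∧ 0 ≤ max_duration
    · rw [if_pos h2, if_pos h2, splitSceneLoop_cons, splitSceneLoop_cons, List.append_assoc]
    · rw [if_neg h2, if_neg h2, List.append_nil]
termination_by (scene.2 - scene.1).toNat
decreasing_by
 all_goals
  simp only [PySem.Int.floordiv_eq_ediv_of_pos (show (0:Int) < 2 from by decide)]
  omega

-- ===== VERDICT (by name: the statement is the Claim_ definition above) =====
theorem split_scene_recursively_spec : Claim_equal_split_scene_recursively := by
  intro scene fps max_duration min_duration _ _
  unfold Spec_split_scene_recursively split_scene_recursively_alt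
  rw [splitSceneLoop_cons, splitSceneLoop, List.nil_append]
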